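-- pv_equiv track=rewrite | github.com/rjwen2045458/UoE_ANLP | asgn1.py | preprocess_line
-- ===== SOURCE A (Python) =====
-- def preprocess_line(line):
--     line = line.lower();
--     line = list(line);  # turn the line into list
--     lenth = len(line);
--     i = 0;  # i is the index of the current character to be checked
--     while i < lenth:   # literate until all characters checked
--         chara = line[i];
--         # pass if chara is valid, else delete or change it.
--         if ('a' <= chara <= 'z') or (chara == '.') or (chara == ' '):
--             i += 1;
--         elif '0' <= chara <= '9':
--             line[i] = '0';
--             i += 1;
--         else:
--             line.pop(i);
--             lenth -= 1;
--     # add "#"s for tri-gram training.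
--     line = '##' + ''.join(line) + '#';
--     return line
-- ===== SOURCE B (Python) =====
-- def preprocess_line(line):
--     return '##' + ''.join(
--         '0' if c.isdigit() else c
--         for c in line.lower()
--         if c.isdigit() or 'a' <= c <= 'z' or c in '. '
--     ) + '#'
-- ===== Notes on version B (the rewrite author's own statement) =====
-- stated objective: idiomatic
-- what changed: Replaced the index-tracking while loop that mutates the char list in place (pop/assignment) with a single filter-map comprehension over the lowercased string; no mutation, no index bookkeeping.
import Mathlib
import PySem

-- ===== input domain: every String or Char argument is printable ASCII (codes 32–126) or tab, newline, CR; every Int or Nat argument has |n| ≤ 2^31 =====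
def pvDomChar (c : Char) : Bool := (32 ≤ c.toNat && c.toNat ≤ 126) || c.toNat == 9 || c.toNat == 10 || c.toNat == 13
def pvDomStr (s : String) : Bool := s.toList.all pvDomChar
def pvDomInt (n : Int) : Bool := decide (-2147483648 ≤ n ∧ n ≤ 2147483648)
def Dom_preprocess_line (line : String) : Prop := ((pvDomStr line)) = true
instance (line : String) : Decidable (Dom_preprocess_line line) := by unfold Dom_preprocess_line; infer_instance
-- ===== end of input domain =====

-- B replaces A's in-place while loop (index bookkeeping, pop, element assignment) with a
-- single filter-map pass over the lowercased string (objective: idiomatic, no mutation).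

-- ===== PORT A =====
-- A's while loop: i advances past kept chars, digits are overwritten with '0', others popped.
def pvLoopA (line : List Char) (i : Nat) : List Char :=
  if h : i < line.length then
    let chara := line.get ⟨i, h⟩
    if ('a' ≤ chara && chara ≤ 'z') || chara == '.' || chara == ' ' then
      pvLoopA line (i + 1)
    else if '0' ≤ chara && chara ≤ '9' then
      pvLoopA (line.set i '0') (i + 1)
    else
      pvLoopA (line.eraseIdx i) i
  else line
termination_by line.length - i
decreasing_by
  · omega
  · simp only [List.length_set]; omega
  · simp only [List.length_eraseIdx, if_pos h]; omega

def preprocess_line (line : String) : String :=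
  "##" ++ String.ofList (pvLoopA (PySem.Str.lower line).toList 0) ++ "#"

-- ===== PORT B =====
-- the comprehension's body: filter condition first, then the digit→'0' map
def pvPickB (c : Char) : Option Char :=
  if PySem.Chars.isdigit c || ('a' ≤ c && c ≤ 'z') || c == '.' || c == ' ' then
    (if PySem.Chars.isdigit c then some '0' else some c)
  else none

def preprocess_line_alt (line : String) : String :=
  "##" ++ String.ofList ((PySem.Str.lower line).toList.filterMap pvPickB) ++ "#"

-- ===== PRECONDITION & SPEC =====
def Spec_preprocess_line (line : String) (out : String) : Prop := out = preprocess_line_alt line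
instance (line : String) (out : String) : Decidable (Spec_preprocess_line line out) := by unfold Spec_preprocess_line; infer_instance

-- ===== CLAIM (what is proved, stated in full; the proofs are below) =====
def Claim_equal_preprocess_line : Prop := ∀ (line : String), Dom_preprocess_line line → Spec_preprocess_line line (preprocess_line line)

-- ===== LEMMAS AND PROOFS =====

theorem pvKeep_not_digit (c : Char)
    (h : (('a' ≤ c && c ≤ 'z') || c == '.' || c == ' ') = true) :
    PySem.Chars.isdigit c = false := by
  simp only [Bool.or_eq_true, Bool.and_eq_true, decide_eq_true_eq, beq_iff_eq] at h
  simp only [PySem.Chars.isdigit, Bool.and_eq_false_iff, decide_eq_false_iff_not]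
  have h9 : ¬ ('a' : Char) ≤ '9' := by decide
  rcases h with (⟨h1, -⟩ | rfl) | rfl
  · exact Or.inr fun hc => h9 (le_trans h1 hc)
  · decide
  · decide

theorem pvLoopA_eq (rest done : List Char) :
    pvLoopA (done ++ rest) done.length = done ++ rest.filterMap pvPickB := by
  induction rest generalizing done with
  | nil => rw [pvLoopA]; simp
  | cons c rs ih =>
    rw [pvLoopA]
    have hlt : done.length < (done ++ c :: rs).length := by simp
    rw [dif_pos hlt]
    have hget : (done ++ c :: rs).get ⟨done.length, hlt⟩ = c := by
      rw [List.get_eq_getElem, List.getElem_append_right (le_refl _)]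
      simp
    rw [hget]
    by_cases hk : (('a' ≤ c && c ≤ 'z') || c == '.' || c == ' ') = true
    · rw [if_pos hk]
      have : done ++ c :: rs = (done ++ [c]) ++ rs := by simp
      rw [this]
      have hlen : done.length + 1 = (done ++ [c]).length := by simp
      rw [hlen, ih (done ++ [c])]
      have hk' : (('a' ≤ c ∧ c ≤ 'z') ∨ c = '.') ∨ c = ' ' := by simpa using hk
      simp [pvPickB, pvKeep_not_digit c hk, hk']
    · rw [if_neg hk]
      by_cases hd : ('0' ≤ c && c ≤ '9') = true
      · rw [if_pos hd]
        have hset : (done ++ c :: rs).set done.length '0' = (done ++ ['0']) ++ rs := by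
          rw [List.set_append, if_neg (by omega)]
          simp
        have hlen : done.length + 1 = (done ++ ['0']).length := by simp
        rw [hset, hlen, ih (done ++ ['0'])]
        have hdig : PySem.Chars.isdigit c = true := by
          simpa [PySem.Chars.isdigit] using hd
        simp [pvPickB, hdig]
      · rw [if_neg hd]
        have hera : (done ++ c :: rs).eraseIdx done.length = done ++ rs := by
          rw [List.eraseIdx_append_of_length_le (le_refl _)]
          simp
        rw [hera, ih done]
        have hdig : PySem.Chars.isdigit c = false := by
          simpa [PySem.Chars.isdigit] using hd
        have hk' : ¬ ((('a' ≤ c ∧ c ≤ 'z') ∨ c = '.') ∨ c = ' ') := by simpa using hk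
        simp [pvPickB, hdig, hk']

-- ===== VERDICT (by name: the statement is the Claim_ definition above) =====
theorem preprocess_line_spec : Claim_equal_preprocess_line := by
  intro line _
  unfold Spec_preprocess_line preprocess_line preprocess_line_alt
  have := pvLoopA_eq (PySem.Str.lower line).toList []
  simpa using congrArg (fun l => "##" ++ String.ofList l ++ "#") this
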